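-- pv_equiv track=rewrite | github.com/lakenn/redmart | codinggame/roller_coaster.py | effective_play_rc
-- ===== SOURCE A (Python) =====
-- def effective_play_rc(l, groups, start, total_len):
--     cum_sum = 0
--     idx = start
--
--     while True:
--
--         if cum_sum + groups[idx] <= l:
--             cum_sum += groups[idx]
--             idx = (idx + 1) % total_len
--
--             # circle !
--             if idx == start:
--                 break
--
--         else:
--             break
--
--     return cum_sum, idx
-- ===== SOURCE B (Python) =====
-- def effective_play_rc(l, groups, start, total_len):
--     # Fast path: the first group alone does not fit, nobody boards.
--     if groups[start] > l:
--         return 0, start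
--     # Prefix-sum table over the circle walked from start, then scan it for the cut point.
--     ps = [0]
--     for i in range(total_len):
--         ps.append(ps[-1] + groups[(start + i) % total_len])
--     k = 0
--     while k < total_len and ps[k + 1] <= l:
--         k += 1
--     return ps[k], (start + k) % total_len
-- ===== Notes on version B (the rewrite author's own statement) =====
-- stated objective: alternative
-- what changed: Replaces the step-by-step circular simulation (running accumulator, modular index, break-on-circle) by a no-fit fast path plus a precomputed prefix-sum table over the circle that is then scanned for the cut point.
-- outside the precondition, e.g. on effective_play_rc(10, [1, 1], -1, 2): A returns (10, 1), B returns (2, 1); on effective_play_rc(5, [2, 3, 4], 2, 2): A returns (4, 1), B returns (5, 0); on effective_play_rc(1, [1, 2], 0, 5): A returns (1, 1), B raises IndexError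
import Mathlib
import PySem

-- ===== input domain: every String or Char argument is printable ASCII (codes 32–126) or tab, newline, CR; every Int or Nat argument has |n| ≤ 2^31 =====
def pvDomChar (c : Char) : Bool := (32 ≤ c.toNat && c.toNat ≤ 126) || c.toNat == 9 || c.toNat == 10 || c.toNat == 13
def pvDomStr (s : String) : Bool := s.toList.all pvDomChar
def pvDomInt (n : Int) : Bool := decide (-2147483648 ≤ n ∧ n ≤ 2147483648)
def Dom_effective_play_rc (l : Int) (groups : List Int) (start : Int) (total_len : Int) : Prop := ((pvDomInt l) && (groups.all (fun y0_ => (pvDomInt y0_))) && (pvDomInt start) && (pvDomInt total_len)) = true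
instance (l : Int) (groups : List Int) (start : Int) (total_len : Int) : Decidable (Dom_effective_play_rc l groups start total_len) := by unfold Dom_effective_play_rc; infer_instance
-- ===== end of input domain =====

-- B replaces the circular step-by-step simulation by a no-fit fast path plus a prefix-sum table over the circle scanned for the cut point (alternative decomposition, same cost).

-- ===== PORT A =====
-- the 'while True' loop of A; fuel makes the port total (under Pre_ the loop takes at most total_len iterations)
def rcLoop (l : Int) (groups : List Int) (start : Int) (total_len : Int) :
    Nat → Int → Int → Int × Int
  | 0, cum, idx => (cum, idx)
  | fuel + 1, cum, idx =>
    match PySem.List.pyGet? groups idx with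
    | none => (cum, idx)   -- groups[idx] raises IndexError in Python; outside Pre_
    | some g =>
      if cum + g ≤ l then
        let cum' := cum + g
        let idx' := PySem.Int.mod (idx + 1) total_len
        if idx' = start then (cum', idx')
        else rcLoop l groups start total_len fuel cum' idx'
      else (cum, idx)

def effective_play_rc (l : Int) (groups : List Int) (start : Int) (total_len : Int) : Int × Int :=
  rcLoop l groups start total_len total_len.natAbs 0 start

-- ===== PORT B =====
-- the 'while k < total_len and ps[k+1] <= l' loop of B; fuel makes the port total
def cutLoop (l : Int) (total_len : Int) (ps : List Int) : Nat → Int → Int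
  | 0, k => k
  | fuel + 1, k =>
    match PySem.List.pyGet? ps (k + 1) with
    | none => k   -- ps[k+1] raises IndexError in Python; outside Pre_
    | some v => if k < total_len ∧ v ≤ l then cutLoop l total_len ps fuel (k + 1) else k

def effective_play_rc_alt (l : Int) (groups : List Int) (start : Int) (total_len : Int) : Int × Int :=
  match PySem.List.pyGet? groups start with
  | none => (0, 0)   -- groups[start] raises IndexError in Python; outside Pre_
  | some g0 =>
    if g0 > l then (0, start)
    else
      let ps := (PySem.List.pyRange 0 total_len 1).foldl
        (fun acc i => acc ++ [PySem.List.pyGetD acc (-1) 0 +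
          PySem.List.pyGetD groups (PySem.Int.mod (start + i) total_len) 0]) [(0 : Int)]
        -- groups[(start+i) % total_len]: an out-of-range access raises IndexError in Python; outside Pre_
      let k := cutLoop l total_len ps ps.length 0
      (PySem.List.pyGetD ps k 0, PySem.Int.mod (start + k) total_len)

-- ===== PRECONDITION & SPEC =====
-- Pre_ admits the coherent circle inputs (0 < total_len ≤ len(groups), start in [0, total_len)) and,
-- besides them, every input whose first group alone already exceeds l (A stops at once with (0, start)).
-- It excludes the remaining inputs: there A raises IndexError/ZeroDivisionError, diverges (the
-- circle-closing test 'idx == start' is unreachable for an out-of-range start), or returns an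
-- accidental value of a multi-lap out-of-range walk.
def Pre_effective_play_rc (l : Int) (groups : List Int) (start : Int) (total_len : Int) : Prop :=
  (0 < total_len ∧ total_len ≤ (groups.length : Int) ∧ 0 ≤ start ∧ start < total_len) ∨
  (-(groups.length : Int) ≤ start ∧ start < (groups.length : Int) ∧ PySem.List.pyGetD groups start 0 > l)
instance (l : Int) (groups : List Int) (start : Int) (total_len : Int) : Decidable (Pre_effective_play_rc l groups start total_len) := by unfold Pre_effective_play_rc; infer_instance

def pvWitness_effective_play_rc : Int × List Int × Int × Int := (3, [1, 2, 3], 1, 3)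

def Spec_effective_play_rc (l : Int) (groups : List Int) (start : Int) (total_len : Int) (out : Int × Int) : Prop := out = effective_play_rc_alt l groups start total_len
instance (l : Int) (groups : List Int) (start : Int) (total_len : Int) (out : Int × Int) : Decidable (Spec_effective_play_rc l groups start total_len out) := by unfold Spec_effective_play_rc; infer_instance

-- ===== CLAIM (what is proved, stated in full; the proofs are below) =====
def Claim_equal_effective_play_rc : Prop := ∀ (l : Int) (groups : List Int) (start : Int) (total_len : Int), Dom_effective_play_rc l groups start total_len → Pre_effective_play_rc l groups start total_len → Spec_effective_play_rc l groups start total_len (effective_play_rc l groups start total_len)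

-- ===== LEMMAS AND PROOFS =====

-- running prefix sums starting from c
def tsums (c : Int) : List Int → List Int
  | [] => []
  | g :: gs => (c + g) :: tsums (c + g) gs

theorem tsums_len (c : Int) (xs : List Int) : (tsums c xs).length = xs.length := by
  induction xs generalizing c with
  | nil => rfl
  | cons g gs ih => simp [tsums, ih]

theorem foldl_ps (xs : List Int) : ∀ (acc : List Int) (c : Int), PySem.List.pyGetD acc (-1) 0 = c →
    xs.foldl (fun acc g => acc ++ [PySem.List.pyGetD acc (-1) 0 + g]) acc = acc ++ tsums c xs := by
  induction xs with
  | nil => intro acc c _; simp [tsums]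
  | cons g gs ih =>
    intro acc c hc
    simp only [List.foldl_cons, hc, tsums]
    rw [ih (acc ++ [c + g]) (c + g) (by simp [PySem.List.pyGetD_neg_one_append_singleton])]
    simp

theorem tsums_get (xs : List Int) : ∀ (c : Int) (k : Nat), k < xs.length →
    (tsums c xs)[k]? = some (c + (xs.take (k+1)).sum) := by
  induction xs with
  | nil => intro c k h; simp at h
  | cons g gs ih =>
    intro c k h
    cases k with
    | zero => simp [tsums]
    | succ k =>
      simp only [tsums, List.getElem?_cons_succ]
      rw [ih (c + g) k (by simpa using h)]
      simp [add_assoc]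

theorem ps_get (xs : List Int) (k : Nat) (h : k ≤ xs.length) :
    (0 :: tsums 0 xs)[k]? = some ((xs.take k).sum) := by
  cases k with
  | zero => simp
  | succ k =>
    simp only [List.getElem?_cons_succ]
    rw [tsums_get xs 0 k (by omega)]
    simp

theorem rot_elem (groups : List Int) (s t : Nat) (hs : s ≤ groups.length) (ht : t < groups.length) :
    (groups.drop s ++ groups.take s)[t]? = groups[(s + t) % groups.length]? := by
  set n := groups.length with hn
  by_cases h : s + t < n
  · rw [Nat.mod_eq_of_lt h]
    rw [List.getElem?_append_left (by simp [← hn]; omega)]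
    simp [List.getElem?_drop]
  · have h1 : (s + t) % n = s + t - n := by
      rw [Nat.mod_eq_sub_mod (by omega), Nat.mod_eq_of_lt (by omega)]
    have hd : (List.drop s groups).length = n - s := by simp [← hn]
    rw [h1, List.getElem?_append_right (by rw [hd]; omega)]
    rw [List.getElem?_take, if_pos (by rw [hd]; omega)]
    congr 1
    rw [hd]; omega

theorem wrap_iff (start : Int) (n t : Nat) (h0 : 0 ≤ start) (hlt : start < (n:Int)) (ht : t + 1 ≤ n) :
    (start + (t:Int) + 1) % (n:Int) = start ↔ t + 1 = n := by
  constructor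
  · intro h
    by_contra hne
    have ht1 : (t:Int) + 1 < (n:Int) := by
      have : t + 1 < n := by omega
      exact_mod_cast this
    by_cases hlo : start + (t:Int) + 1 < (n:Int)
    · rw [Int.emod_eq_of_lt (by omega) hlo] at h
      omega
    · have hh : (start + (t:Int) + 1) % (n:Int) = start + (t:Int) + 1 - (n:Int) := by
        have he := Int.add_mul_emod_self_left (a := start + (t:Int) + 1 - (n:Int)) (b := (n:Int)) (c := 1)
        rw [show start + (t:Int) + 1 - (n:Int) + (n:Int) * 1 = start + (t:Int) + 1 from by ring] at he
        rw [he, Int.emod_eq_of_lt (by omega) (by omega)]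
      rw [hh] at h
      omega
  · intro h
    have he : start + (t:Int) + 1 = start + (n:Int) * 1 := by
      have : ((t:Int)) + 1 = (n:Int) := by exact_mod_cast congrArg (Nat.cast : Nat → Int) h
      omega
    rw [he, Int.add_mul_emod_self_left, Int.emod_eq_of_lt h0 hlt]

theorem toNat_emod_shift (start : Int) (n t : Nat) (h0 : 0 ≤ start) :
    ((start + (t:Int)) % (n:Int)).toNat = (start.toNat + t) % n := by
  have hst : start = (start.toNat : Int) := (Int.toNat_of_nonneg h0).symm
  have h2 : ((start.toNat : Int) + (t:Int)) % (n:Int) = (((start.toNat + t) % n : Nat) : Int) := by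
    push_cast
    ring_nf
  conv_lhs => rw [hst]
  rw [h2, Int.toNat_natCast]

-- the element A reads at circle position j of the window groups[:n], as an option lookup
theorem window_elem (groups : List Int) (start : Int) (n t : Nat)
    (hnlen : n ≤ groups.length) (h0 : 0 ≤ start) (hlt : start < (n:Int)) (ht : t < n) :
    PySem.List.pyGet? groups ((start + (t:Int)) % (n:Int)) =
      ((groups.take n).drop start.toNat ++ (groups.take n).take start.toNat)[t]? := by
  have hnpos : (0:Int) < (n:Int) := by omega
  have hnn : 0 ≤ (start + (t:Int)) % (n:Int) := Int.emod_nonneg _ (by omega)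
  have hlt2 : (start + (t:Int)) % (n:Int) < (n:Int) := Int.emod_lt_of_pos _ hnpos
  have hW : ((groups.take n).drop start.toNat ++ (groups.take n).take start.toNat)[t]? =
      (groups.take n)[(start.toNat + t) % (groups.take n).length]? := by
    exact rot_elem (groups.take n) start.toNat t (by simp; omega) (by simp; omega)
  rw [PySem.List.pyGet?_of_nonneg groups hnn, toNat_emod_shift start n t h0, hW]
  have hWlen : (groups.take n).length = n := by simp; omega
  rw [hWlen, List.getElem?_take, if_pos (Nat.mod_lt _ (by omega))]

theorem loop_eq (l : Int) (groups rot ps : List Int) (start : Int) (n : Nat)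
    (hnlen : n ≤ groups.length) (h0 : 0 ≤ start) (hlt : start < (n:Int))
    (hrot : rot = (groups.take n).drop start.toNat ++ (groups.take n).take start.toNat)
    (hps : ps = 0 :: tsums 0 rot) :
    ∀ (fuel t : Nat), fuel + t = n →
      rcLoop l groups start (n:Int) fuel ((rot.take t).sum) ((start + (t:Int)) % (n:Int)) =
        (PySem.List.pyGetD ps (cutLoop l (n:Int) ps fuel (t:Int)) 0,
         PySem.Int.mod (start + cutLoop l (n:Int) ps fuel (t:Int)) (n:Int)) := by
  have hrl : rot.length = n := by
    simp [hrot]; omega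
  have hnpos : 0 < (n:Int) := by omega
  have hpsget : ∀ k : Nat, k ≤ n → PySem.List.pyGetD ps (k : Int) 0 = (rot.take k).sum := by
    intro k hk
    rw [PySem.List.pyGetD_natCast, hps, List.getD_eq_getElem?_getD, ps_get rot k (by omega)]
    rfl
  intro fuel
  induction fuel with
  | zero =>
    intro t hfu
    have htn : t = n := by omega
    subst htn
    simp only [rcLoop, cutLoop]
    rw [hpsget t (le_refl t), PySem.Int.mod_eq_emod_of_pos hnpos]
  | succ fuel ih =>
    intro t hfu
    have htlt : t < n := by omega
    simp only [rcLoop, cutLoop]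
    have hidx : PySem.List.pyGet? groups ((start + (t:Int)) % (n:Int)) = rot[t]? := by
      rw [window_elem groups start n t hnlen h0 hlt htlt, hrot]
    have hget : rot[t]? = some (rot[t]'(by omega)) := List.getElem?_eq_getElem (by omega)
    have hsum : (rot.take (t+1)).sum = (rot.take t).sum + rot[t]'(by omega) :=
      List.sum_take_succ rot t (by omega)
    have hbget : PySem.List.pyGet? ps ((t:Int) + 1) = some ((rot.take (t+1)).sum) := by
      have hc : (t:Int) + 1 = ((t+1 : Nat) : Int) := by push_cast; ring
      rw [hc, PySem.List.pyGet?_natCast, hps, ps_get rot (t+1) (by omega)]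
    rw [hidx, hget, hbget]
    simp only
    have hc : (t:Int) + 1 = ((t+1 : Nat) : Int) := by push_cast; ring
    have hc2 : start + (t:Int) + 1 = start + ((t+1 : Nat) : Int) := by push_cast; ring
    by_cases hfit : (rot.take t).sum + rot[t]'(by omega) ≤ l
    · have hbcond : ((t:Int) < (n:Int) ∧ (rot.take (t+1)).sum ≤ l) :=
        ⟨by exact_mod_cast htlt, by rw [hsum]; exact hfit⟩
      have hmodstep : PySem.Int.mod ((start + (t:Int)) % (n:Int) + 1) (n:Int)
          = (start + (t:Int) + 1) % (n:Int) := by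
        rw [PySem.Int.mod_eq_emod_of_pos hnpos, Int.emod_add_emod]
      rw [if_pos hfit, hmodstep, if_pos hbcond]
      by_cases hend : t + 1 = n
      · have hfz : fuel = 0 := by omega
        subst hfz
        rw [if_pos ((wrap_iff start n t h0 hlt (by omega)).2 hend)]
        simp only [cutLoop]
        rw [hc, hpsget (t+1) (by omega), hsum, PySem.Int.mod_eq_emod_of_pos hnpos, ← hc2,
          (wrap_iff start n t h0 hlt (by omega)).2 hend]
      · rw [if_neg (fun hcx => hend ((wrap_iff start n t h0 hlt (by omega)).1 hcx))]
        rw [hc2, hc, ← hsum]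
        exact ih (t+1) (by omega)
    · rw [if_neg hfit, if_neg (by intro hcx; rw [hsum] at hcx; exact hfit hcx.2)]
      rw [hpsget t (by omega), PySem.Int.mod_eq_emod_of_pos hnpos]

-- one unit of spare fuel never changes the cut loop's result (it stops at k = n by itself)
theorem cutLoop_ext (l : Int) (ps : List Int) (n : Nat) (hlen : ps.length = n + 1) :
    ∀ (f t : Nat), f + t = n →
      cutLoop l ((n:Nat):Int) ps (f+1) ((t:Nat):Int) = cutLoop l ((n:Nat):Int) ps f ((t:Nat):Int) := by
  intro f
  induction f with
  | zero =>
    intro t hft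
    have htn : t = n := by omega
    subst htn
    simp only [cutLoop]
    have hc : ((t:Nat):Int) + 1 = ((t+1 : Nat) : Int) := by push_cast; ring
    rw [hc, PySem.List.pyGet?_natCast]
    have hnone : ps[t+1]? = none := by
      rw [List.getElem?_eq_none_iff]
      omega
    rw [hnone]
  | succ f ih =>
    intro t hft
    conv_lhs => rw [cutLoop]
    conv_rhs => rw [cutLoop]
    cases hv : PySem.List.pyGet? ps (((t:Nat):Int) + 1) with
    | none => rfl
    | some v =>
      simp only
      by_cases hcond : ((t:Nat):Int) < ((n:Nat):Int) ∧ v ≤ l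
      · rw [if_pos hcond, if_pos hcond]
        have hc : ((t:Nat):Int) + 1 = ((t+1 : Nat) : Int) := by push_cast; ring
        rw [hc]
        exact ih (t+1) (by omega)
      · rw [if_neg hcond, if_neg hcond]

-- groups[start] as an option lookup, for any in-range (possibly negative) start
theorem first_elem (groups : List Int) (start : Int)
    (hge : -(groups.length : Int) ≤ start) (hlt : start < (groups.length : Int)) :
    PySem.List.pyGet? groups start = some (PySem.List.pyGetD groups start 0) := by
  by_cases h0 : 0 ≤ start
  · rw [PySem.List.pyGet?_eq_some_getElem groups h0 hlt,
      PySem.List.pyGetD_eq_getElem groups 0 h0 hlt]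
  · obtain ⟨k, hkeq⟩ : ∃ k : Nat, start = -((k : Nat) : Int) := ⟨(-start).toNat, by omega⟩
    subst hkeq
    have hk1 : 0 < k := by omega
    have hk2 : k ≤ groups.length := by omega
    rw [PySem.List.pyGet?_neg_natCast groups k hk1 hk2,
      PySem.List.pyGetD_neg_natCast groups k 0 hk1 hk2]
    exact List.getElem?_eq_getElem (by omega)

-- both sides stop at once when the first group alone exceeds l
theorem imm_case (l : Int) (groups : List Int) (start total_len : Int)
    (hge : -(groups.length : Int) ≤ start) (hlt : start < (groups.length : Int))
    (hbig : PySem.List.pyGetD groups start 0 > l) :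
    effective_play_rc l groups start total_len = effective_play_rc_alt l groups start total_len := by
  have hg := first_elem groups start hge hlt
  unfold effective_play_rc effective_play_rc_alt
  rw [hg]
  simp only
  rw [if_pos hbig]
  cases hfa : total_len.natAbs with
  | zero => simp [rcLoop]
  | succ m =>
    simp only [rcLoop, hg]
    rw [if_neg (by omega)]

-- the table B builds is the prefix-sum list of the rotated circle window
theorem table_eq (groups : List Int) (start : Int) (n : Nat)
    (hnpos : 0 < n) (hnlen : n ≤ groups.length) (h0 : 0 ≤ start) (hlt : start < (n:Int)) :
    (PySem.List.pyRange 0 ((n:Nat):Int) 1).foldl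
        (fun acc i => acc ++ [PySem.List.pyGetD acc (-1) 0 +
          PySem.List.pyGetD groups (PySem.Int.mod (start + i) ((n:Nat):Int)) 0]) [(0 : Int)] =
      0 :: tsums 0 ((groups.take n).drop start.toNat ++ (groups.take n).take start.toNat) := by
  set rot := (groups.take n).drop start.toNat ++ (groups.take n).take start.toNat with hrot
  have hrl : rot.length = n := by simp [hrot]; omega
  have hmap : (PySem.List.pyRange 0 ((n:Nat):Int) 1).map
      (fun i => PySem.List.pyGetD groups (PySem.Int.mod (start + i) ((n:Nat):Int)) 0) = rot := by
    rw [PySem.List.pyRange_zero_natCast, List.map_map]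
    apply List.ext_getElem?
    intro t
    rw [List.getElem?_map]
    by_cases ht : t < n
    · rw [List.getElem?_range ht]
      simp only [Option.map_some, Function.comp_apply]
      have hnn : 0 ≤ (start + (t:Int)) % ((n:Nat):Int) := Int.emod_nonneg _ (by omega)
      have hlt2 : (start + (t:Int)) % ((n:Nat):Int) < ((n:Nat):Int) :=
        Int.emod_lt_of_pos _ (by omega)
      rw [PySem.Int.mod_eq_emod_of_pos (by omega),
        PySem.List.pyGetD_eq_getElem groups 0 hnn (by omega)]
      have hw := window_elem groups start n t hnlen h0 hlt ht
      rw [PySem.List.pyGet?_of_nonneg groups hnn, ← hrot] at hw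
      rw [← List.getElem?_eq_getElem (by omega : ((start + (t:Int)) % ((n:Nat):Int)).toNat < groups.length), hw]
    · rw [List.getElem?_eq_none (by simpa using ht), List.getElem?_eq_none (by omega)]
      rfl
  calc (PySem.List.pyRange 0 ((n:Nat):Int) 1).foldl
        (fun acc i => acc ++ [PySem.List.pyGetD acc (-1) 0 +
          PySem.List.pyGetD groups (PySem.Int.mod (start + i) ((n:Nat):Int)) 0]) [(0 : Int)]
      = ((PySem.List.pyRange 0 ((n:Nat):Int) 1).map
          (fun i => PySem.List.pyGetD groups (PySem.Int.mod (start + i) ((n:Nat):Int)) 0)).foldl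
          (fun acc g => acc ++ [PySem.List.pyGetD acc (-1) 0 + g]) [(0 : Int)] := by
        rw [List.foldl_map]
    _ = 0 :: tsums 0 rot := by
        rw [hmap, foldl_ps rot [0] 0 rfl, List.singleton_append]

-- ===== VERDICT (by name: the statement is the Claim_ definition above) =====
theorem effective_play_rc_spec : Claim_equal_effective_play_rc := by
  intro l groups start total_len _ hpre
  unfold Spec_effective_play_rc
  rcases hpre with ⟨hpos, hlen, h0, hlt⟩ | ⟨hge, hlt, hbig⟩
  · by_cases hbig : PySem.List.pyGetD groups start 0 > l
    · exact imm_case l groups start total_len (by omega) (by omega) hbig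
    · obtain ⟨n, rfl⟩ : ∃ n : Nat, total_len = ((n:Nat):Int) := ⟨total_len.toNat, by omega⟩
      have hnpos : 0 < n := by omega
      have hnlen : n ≤ groups.length := by omega
      have hg := first_elem groups start (by omega) (by omega)
      unfold effective_play_rc effective_play_rc_alt
      rw [hg]
      simp only
      rw [if_neg hbig]
      rw [table_eq groups start n hnpos hnlen h0 hlt]
      set rot := (groups.take n).drop start.toNat ++ (groups.take n).take start.toNat with hrot
      have hrl : rot.length = n := by simp [hrot]; omega
      have hpslen : (0 :: tsums 0 rot).length = n + 1 := by simp [tsums_len, hrl]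
      have hst : ((n:Nat):Int).natAbs = n := Int.natAbs_natCast n
      rw [hst, hpslen]
      have hext := cutLoop_ext l (0 :: tsums 0 rot) n hpslen n 0 (by omega)
      rw [show ((0:Nat):Int) = (0:Int) from rfl] at hext
      rw [hext]
      have hmain := loop_eq l groups rot (0 :: tsums 0 rot) start n hnlen h0 hlt hrot rfl n 0 (by omega)
      simp only [List.take_zero, List.sum_nil, Int.natCast_zero, add_zero] at hmain
      rw [Int.emod_eq_of_lt h0 hlt] at hmain
      exact hmain
  · exact imm_case l groups start total_len hge hlt hbig
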